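-- pv_equiv track=rewrite | github.com/qnbhd/mljet | tests/utils/pipelines/graphs.py | is_topsorted
-- ===== SOURCE A (Python) =====
-- def is_topsorted(graph, order) -> bool:
--     visited = set()
--     if len(order) != len(graph):
--         return False
--     for vertex in order:
--         if vertex in visited:
--             return False
--         visited.add(vertex)
--         for neighbour in graph[vertex]:
--             if neighbour in visited:
--                 return False
--     return True
-- ===== SOURCE B (Python) =====
-- def is_topsorted(graph, order) -> bool:
--     if len(order) != len(graph):
--         return False
--     if len(set(order)) != len(order):
--         return False
--     pos = {v: i for i, v in enumerate(order)}
--     inf = float('inf')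
--     return all(pos[v] < pos.get(n, inf)
--                for v in order
--                for n in graph[v])
-- ===== Notes on version B (the rewrite author's own statement) =====
-- stated objective: alternative
-- what changed: Replaces A's single pass that grows a visited set and scans it per neighbour with a two-pass decomposition: an upfront duplicate check via len(set(order)), a position table built once from enumerate(order), and a verification pass requiring pos[v] < pos.get(n, inf) for every edge.
-- outside the precondition, e.g. on is_topsorted({0: [0], 1: []}, [0, 5]): A returns False, B returns False; on is_topsorted({0: [], 1: [], 2: []}, [0, 0, 7]): A returns False, B returns False
import Mathlib
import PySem

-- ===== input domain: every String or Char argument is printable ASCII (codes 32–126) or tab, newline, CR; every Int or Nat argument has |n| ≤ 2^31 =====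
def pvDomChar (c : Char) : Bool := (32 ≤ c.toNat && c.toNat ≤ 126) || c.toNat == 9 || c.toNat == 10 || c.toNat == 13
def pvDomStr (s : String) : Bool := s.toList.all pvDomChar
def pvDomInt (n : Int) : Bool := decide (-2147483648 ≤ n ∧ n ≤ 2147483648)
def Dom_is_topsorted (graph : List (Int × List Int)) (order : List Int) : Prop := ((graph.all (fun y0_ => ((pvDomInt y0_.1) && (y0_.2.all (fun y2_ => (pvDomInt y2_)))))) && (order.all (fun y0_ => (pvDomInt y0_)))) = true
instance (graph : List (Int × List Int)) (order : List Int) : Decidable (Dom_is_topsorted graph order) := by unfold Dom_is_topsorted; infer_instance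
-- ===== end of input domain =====

-- B replaces A's single pass with a growing visited set by a two-pass decomposition
-- (duplicate check, then a prebuilt position table verified edge by edge); objective: alternative.

-- ===== PORT A =====
-- A's main loop: for vertex in order: if vertex in visited: return False; visited.add(vertex);
-- for neighbour in graph[vertex]: if neighbour in visited: return False.
-- graph[vertex] raising KeyError is the `none` branch (excluded by Pre_; `false` there is arbitrary).
def topLoopA (graph : List (Int × List Int)) : List Int → PySem.Set Int → Bool
  | [], _ => true
  | v :: rest, visited =>
    if PySem.Set.contains visited v then false
    else
      match (PySem.Dict.mk graph).get? v with
      | none => false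
      | some ns =>
        if ns.any (fun n => PySem.Set.contains (PySem.Set.add visited v) n) then false
        else topLoopA graph rest (PySem.Set.add visited v)

def is_topsorted (graph : List (Int × List Int)) (order : List Int) : Bool :=
  if order.length ≠ graph.length then false
  else topLoopA graph order PySem.Set.empty

-- ===== PORT B =====
-- pos = {v: i for i, v in enumerate(order)}
def posDictB (order : List Int) : PySem.Dict Int Int :=
  (PySem.List.enumerate order 0).foldl (fun d p => d.insert p.2 p.1) PySem.Dict.empty

-- pos.get(n, float('inf')): a missing neighbour compares greater than everything, i.e. `true`.
-- graph[v] raising KeyError is the `none` branch (excluded by Pre_; `false` there is arbitrary);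
-- pos[v] cannot miss inside the `all` (v ∈ order), so `false` on that dead branch is arbitrary.
def is_topsorted_alt (graph : List (Int × List Int)) (order : List Int) : Bool :=
  if order.length ≠ graph.length then false
  else if (PySem.Set.ofList order).length ≠ order.length then false
  else
    order.all (fun v =>
      match (PySem.Dict.mk graph).get? v with
      | none => false
      | some ns =>
        ns.all (fun n =>
          match (posDictB order).get? n with
          | none => true
          | some j =>
            match (posDictB order).get? v with
            | none => false
            | some i => decide (i < j)))

-- ===== PRECONDITION & SPEC =====
-- Pre_ excludes inputs on which A hits graph[vertex] with a vertex that is not a key (KeyError) —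
-- and, being closed-form, also inputs where such a missing key is only shadowed by an earlier
-- duplicate or edge violation, on which A returns False before raising (B also returns False there).
def Pre_is_topsorted (graph : List (Int × List Int)) (order : List Int) : Prop :=
  order.length ≠ graph.length ∨ ∀ v ∈ order, (PySem.Dict.mk graph).contains v = true
instance (graph : List (Int × List Int)) (order : List Int) : Decidable (Pre_is_topsorted graph order) := by unfold Pre_is_topsorted; infer_instance

def pvWitness_is_topsorted : (List (Int × List Int)) × List Int := ([(0, [1]), (1, [])], [0, 1])

def Spec_is_topsorted (graph : List (Int × List Int)) (order : List Int) (out : Bool) : Prop := out = is_topsorted_alt graph order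
instance (graph : List (Int × List Int)) (order : List Int) (out : Bool) : Decidable (Spec_is_topsorted graph order out) := by unfold Spec_is_topsorted; infer_instance

-- ===== CLAIM (what is proved, stated in full; the proofs are below) =====
def Claim_equal_is_topsorted : Prop := ∀ (graph : List (Int × List Int)) (order : List Int), Dom_is_topsorted graph order → Pre_is_topsorted graph order → Spec_is_topsorted graph order (is_topsorted graph order)

-- ===== LEMMAS AND PROOFS =====

-- B's duplicate test: len(set(order)) == len(order) exactly on duplicate-free lists
theorem length_ofList_eq_iff_nodup (l : List Int) :
    (PySem.Set.ofList l).length = l.length ↔ l.Nodup := by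
  constructor
  · induction l with
    | nil => simp
    | cons x xs ih =>
      intro h
      rw [PySem.Set.ofList_cons] at h
      simp only [List.length_cons, PySem.Set.discard, Nat.add_right_cancel_iff] at h
      have h1 := List.length_filter_le (fun y => !y == x) (PySem.Set.ofList xs)
      have h2 := PySem.Set.length_ofList_le (xs := xs)
      have hlen : ((PySem.Set.ofList xs).filter (fun y => !y == x)).length = (PySem.Set.ofList xs).length := by omega
      have hall := (List.length_filter_eq_length_iff).mp hlen
      have hx : x ∉ xs := by
        intro hmem
        have := hall x ((PySem.Set.mem_ofList xs x).mpr hmem)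
        simp at this
      exact List.Nodup.cons hx (ih (by omega))
  · intro h; rw [PySem.Set.ofList_eq_self_of_nodup l h]

-- characterisation of A's loop: it returns True iff every prefix stays duplicate- and
-- back-edge-free relative to the already visited set
theorem topLoopA_eq_true_iff (graph : List (Int × List Int)) (l : List Int) (visited : PySem.Set Int) :
    topLoopA graph l visited = true ↔
      ∀ (i : Nat) (h : i < l.length),
        (l[i] ∉ visited ∧ l[i] ∉ l.take i) ∧
        ∃ ns, (PySem.Dict.mk graph).get? l[i] = some ns ∧
          ∀ n ∈ ns, n ∉ visited ∧ n ∉ l.take (i + 1) := by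
  induction l generalizing visited with
  | nil => simp [topLoopA]
  | cons v rest ih =>
    cases hv : PySem.Set.contains visited v with
    | true =>
      have hvm : v ∈ visited := (PySem.Set.contains_iff visited v).mp hv
      simp only [topLoopA, hv, if_true, Bool.false_eq_true, false_iff, not_forall]
      refine ⟨0, by simp, ?_⟩
      intro hc
      exact hc.1.1 hvm
    | false =>
      have hvm : v ∉ visited := by
        intro hm
        rw [← PySem.Set.contains_iff] at hm
        rw [hv] at hm; exact Bool.noConfusion hm
      cases hget : (PySem.Dict.mk graph).get? v with
      | none =>
        simp only [topLoopA, hv, hget, Bool.false_eq_true, if_false, false_iff, not_forall]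
        refine ⟨0, by simp, ?_⟩
        intro hc
        obtain ⟨ns, hns, _⟩ := hc.2
        simp only [List.getElem_cons_zero] at hns
        rw [hget] at hns; simp at hns
      | some ns =>
        cases hany : ns.any (fun n => PySem.Set.contains (PySem.Set.add visited v) n) with
        | true =>
          simp only [topLoopA, hv, hget, hany, if_true, Bool.false_eq_true, if_false, false_iff,
            not_forall]
          refine ⟨0, by simp, ?_⟩
          intro hc
          obtain ⟨ns', hns', hfor⟩ := hc.2
          simp only [List.getElem_cons_zero] at hns'
          rw [hget] at hns'
          injection hns' with e; subst e
          obtain ⟨n, hn, hmem⟩ := List.any_eq_true.mp hany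
          rw [PySem.Set.contains_iff, PySem.Set.mem_add] at hmem
          have := hfor n hn
          simp only [List.take_succ_cons, List.take_zero, List.mem_cons, List.not_mem_nil] at this
          rcases hmem with h1 | h2
          · exact this.1 h1
          · exact this.2 (Or.inl h2)
        | false =>
          simp only [topLoopA, hv, hget, hany, Bool.false_eq_true, if_false]
          rw [ih (PySem.Set.add visited v)]
          constructor
          · intro hrest i hi
            cases i with
            | zero =>
              refine ⟨⟨hvm, by simp⟩, ns, by simpa using hget, ?_⟩
              intro n hn
              have hnc : ¬ (PySem.Set.contains (PySem.Set.add visited v) n = true) := by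
                intro hc
                have := List.any_eq_true.mpr ⟨n, hn, hc⟩
                rw [hany] at this; exact Bool.noConfusion this
              rw [PySem.Set.contains_iff, PySem.Set.mem_add] at hnc
              push_neg at hnc
              simpa using ⟨hnc.1, hnc.2⟩
            | succ i =>
              have hi' : i < rest.length := by simpa using hi
              obtain ⟨⟨hnv, hnt⟩, ns', hns', hfor⟩ := hrest i hi'
              rw [PySem.Set.mem_add] at hnv
              push_neg at hnv
              refine ⟨⟨hnv.1, ?_⟩, ns', by simpa using hns', ?_⟩
              · simp only [List.getElem_cons_succ, List.take_succ_cons, List.mem_cons]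
                push_neg
                exact ⟨hnv.2, hnt⟩
              · intro n hn
                obtain ⟨h1, h2⟩ := hfor n hn
                rw [PySem.Set.mem_add] at h1
                push_neg at h1
                refine ⟨h1.1, ?_⟩
                simp only [List.take_succ_cons, List.mem_cons]
                push_neg
                exact ⟨h1.2, h2⟩
          · intro hall i hi
            have hsucc := hall (i + 1) (by simpa using Nat.succ_lt_succ hi)
            obtain ⟨⟨hnv, hnt⟩, ns', hns', hfor⟩ := hsucc
            simp only [List.getElem_cons_succ] at hnv hnt hns'
            simp only [List.take_succ_cons, List.mem_cons] at hnt
            push_neg at hnt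
            refine ⟨⟨?_, hnt.2⟩, ns', hns', ?_⟩
            · rw [PySem.Set.mem_add]; push_neg; exact ⟨hnv, hnt.1⟩
            · intro n hn
              obtain ⟨h1, h2⟩ := hfor n hn
              simp only [List.take_succ_cons, List.mem_cons] at h2
              push_neg at h2
              refine ⟨?_, h2.2⟩
              rw [PySem.Set.mem_add]; push_neg; exact ⟨h1, h2.1⟩

theorem posDictB_items (order : List Int) (hnd : order.Nodup) :
    (posDictB order).items = (PySem.List.enumerate order 0).map (fun p => (p.2, p.1)) := by
  unfold posDictB
  rw [PySem.Dict.items_foldl_insert_fresh (PySem.List.enumerate order 0)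
        (fun p => p.2) (fun p => p.1) PySem.Dict.empty
        (fun a _ => PySem.Dict.contains_empty _)
        (by rw [PySem.List.map_snd_enumerate]; exact hnd)]
  simp [PySem.Dict.empty]

theorem posDictB_keys_nodup (order : List Int) (hnd : order.Nodup) :
    (posDictB order).keys.Nodup := by
  have h1 : (posDictB order).keys = (posDictB order).items.map (·.1) := rfl
  rw [h1, posDictB_items order hnd, List.map_map]
  have h2 : ((fun p : Int × Int => p.1) ∘ (fun p : Int × Int => (p.2, p.1))) = (fun p : Int × Int => p.2) := rfl
  rw [h2, PySem.List.map_snd_enumerate]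
  exact hnd

-- the position table answers exactly "n = order[k] at (unique) index k"
theorem posDictB_get? (order : List Int) (hnd : order.Nodup) (n j : Int) :
    (posDictB order).get? n = some j ↔
      ∃ (k : Nat) (h : k < order.length), j = (k : Int) ∧ order[k] = n := by
  rw [PySem.Dict.get?_eq_some_iff_mem_items _ _ _ (posDictB_keys_nodup order hnd)]
  rw [posDictB_items order hnd]
  constructor
  · intro hm
    obtain ⟨p, hp, he⟩ := List.mem_map.mp hm
    obtain ⟨k, hk, hpe⟩ := (PySem.List.mem_enumerate_iff _ _ _).mp hp
    subst hpe
    simp only [Prod.mk.injEq] at he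
    exact ⟨k, hk, by simpa using he.2.symm, he.1⟩
  · intro ⟨k, hk, hj, ho⟩
    apply List.mem_map.mpr
    refine ⟨((k : Int), order[k]), ?_, by simp [hj, ho]⟩
    apply (PySem.List.mem_enumerate_iff _ _ _).mpr
    exact ⟨k, hk, by simp⟩

theorem nodup_of_not_mem_take (l : List Int) (h : ∀ (i : Nat) (hi : i < l.length), l[i] ∉ l.take i) : l.Nodup := by
  rw [List.nodup_iff_getElem?_ne_getElem?]
  intro i j hij hj he
  apply h j hj
  rw [List.getElem?_eq_getElem (by omega), List.getElem?_eq_getElem hj] at he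
  injection he with he
  have hi' : i < (l.take j).length := by simp; omega
  have hm := List.getElem_mem hi'
  rw [List.getElem_take] at hm
  rwa [he] at hm

theorem getElem_mem_take (l : List Int) (k m : Nat) (hk : k < l.length) (hkm : k < m) : l[k] ∈ l.take m := by
  have hi' : k < (l.take m).length := by simp; omega
  have := List.getElem_mem hi'
  rwa [List.getElem_take] at this

theorem exists_of_mem_take (l : List Int) (x : Int) (m : Nat) (hm : x ∈ l.take m) :
    ∃ (k : Nat) (hk : k < l.length), k < m ∧ l[k] = x := by
  obtain ⟨k, hk, he⟩ := List.getElem_of_mem hm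
  rw [List.getElem_take] at he
  simp only [List.length_take] at hk
  exact ⟨k, by omega, by omega, he⟩

theorem main_equiv (graph : List (Int × List Int)) (order : List Int)
    (hpre : order.length ≠ graph.length ∨ ∀ v ∈ order, (PySem.Dict.mk graph).contains v = true) :
    is_topsorted graph order = is_topsorted_alt graph order := by
  unfold is_topsorted is_topsorted_alt
  by_cases hlen : order.length ≠ graph.length
  · rw [if_pos hlen, if_pos hlen]
  · rw [if_neg hlen, if_neg hlen]
    have hkeys : ∀ v ∈ order, (PySem.Dict.mk graph).contains v = true := by
      rcases hpre with h | h
      · exact absurd h hlen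
      · exact h
    by_cases hnd : order.Nodup
    · rw [if_neg (by rw [not_not, length_ofList_eq_iff_nodup]; exact hnd)]
      apply Bool.coe_iff_coe.mp
      rw [topLoopA_eq_true_iff, List.all_eq_true]
      have hempty : ∀ x : Int, x ∉ (PySem.Set.empty : PySem.Set Int) := by
        intro x hx; simp [PySem.Set.empty] at hx
      constructor
      · -- A's invariant gives B's positional condition
        intro hA v hv
        obtain ⟨i, hi, rfl⟩ := List.mem_iff_getElem.mp hv
        obtain ⟨_, ns, hns, hfor⟩ := hA i hi
        rw [hns]
        simp only [List.all_eq_true]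
        intro n hn
        have hposv : (posDictB order).get? order[i] = some (i : Int) :=
          (posDictB_get? order hnd order[i] (i : Int)).mpr ⟨i, hi, rfl, rfl⟩
        cases hpn : (posDictB order).get? n with
        | none => rfl
        | some j =>
          rw [hposv]
          obtain ⟨k, hk, hj, hkn⟩ := (posDictB_get? order hnd n j).mp hpn
          have hnt : n ∉ order.take (i + 1) := (hfor n hn).2
          have hik : i < k := by
            by_contra hle
            apply hnt
            rw [← hkn]
            exact getElem_mem_take order k (i + 1) hk (by omega)
          subst hj
          simp only [decide_eq_true_eq]
          exact_mod_cast hik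
      · -- B's positional condition gives A's invariant
        intro hB i hi
        refine ⟨⟨hempty _, ?_⟩, ?_⟩
        · intro hmem
          obtain ⟨k, hk, hki, hke⟩ := exists_of_mem_take order order[i] i hmem
          have := (List.Nodup.getElem_inj_iff hnd).mp hke
          omega
        · have hv := hB order[i] (List.getElem_mem hi)
          cases hget : (PySem.Dict.mk graph).get? order[i] with
          | none =>
            exfalso
            have hc := hkeys order[i] (List.getElem_mem hi)
            rw [PySem.Dict.contains_eq_isSome_get?, hget] at hc
            simp at hc
          | some ns =>
            rw [hget] at hv
            simp only [List.all_eq_true] at hv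
            refine ⟨ns, rfl, ?_⟩
            intro n hn
            refine ⟨hempty _, ?_⟩
            intro hmem
            obtain ⟨k, hk, hki, hke⟩ := exists_of_mem_take order n (i + 1) hmem
            have hpn : (posDictB order).get? n = some (k : Int) :=
              (posDictB_get? order hnd n (k : Int)).mpr ⟨k, hk, rfl, hke⟩
            have hposv : (posDictB order).get? order[i] = some (i : Int) :=
              (posDictB_get? order hnd order[i] (i : Int)).mpr ⟨i, hi, rfl, rfl⟩
            have := hv n hn
            rw [hpn, hposv] at this
            simp only [decide_eq_true_eq] at this
            have : i < k := by exact_mod_cast this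
            omega
    · rw [if_pos (by rw [Ne, length_ofList_eq_iff_nodup]; exact hnd)]
      cases h : topLoopA graph order PySem.Set.empty with
      | false => rfl
      | true =>
        exfalso
        apply hnd
        rw [topLoopA_eq_true_iff] at h
        exact nodup_of_not_mem_take order (fun i hi => ((h i hi).1).2)

-- ===== VERDICT (by name: the statement is the Claim_ definition above) =====
theorem is_topsorted_spec : Claim_equal_is_topsorted := by
  intro graph order _ hpre
  unfold Spec_is_topsorted
  exact main_equiv graph order hpre
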